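-- pv_equiv track=rewrite | github.com/sakshamtripathi04/telegrambot | main.py | calculate_streak_frequencies
-- ===== SOURCE A (Python) =====
-- import itertools
--
-- def calculate_streak_frequencies(losses, wins):
--     loss_streaks = [sum(1 for _ in g) for k, g in itertools.groupby(losses) if k == 1]
--     win_streaks = [sum(1 for _ in g) for k, g in itertools.groupby(wins) if k == 1]
--     max_losses = max(loss_streaks) if loss_streaks else 0
--     max_wins = max(win_streaks) if win_streaks else 0
--     loss_freq = {3: 0, 4: 0, 5: 0, 6: 0, 7: 0}
--     win_freq = {3: 0, 4: 0, 5: 0, 6: 0}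
--     for streak in loss_streaks:
--         if streak in loss_freq:
--             loss_freq[streak] += 1
--         elif streak > 7:
--             loss_freq[7] += 1
--     for streak in win_streaks:
--         if streak in win_freq:
--             win_freq[streak] += 1
--         elif streak > 6:
--             win_freq[6] += 1
--     return loss_freq, win_freq, max_losses, max_wins
-- ===== SOURCE B (Python) =====
-- def calculate_streak_frequencies(losses, wins):
--     def scan(xs, cap):
--         freq = {k: 0 for k in range(3, cap + 1)}
--         best = 0
--         run = 0
--         for x in xs + [0]:  # sentinel closes the trailing run
--             if x == 1:
--                 run += 1
--             else:
--                 if run > best: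
--                     best = run
--                 if 3 <= run <= cap:
--                     freq[run] += 1
--                 elif run > cap:
--                     freq[cap] += 1
--                 run = 0
--         return freq, best
--     loss_freq, max_losses = scan(losses, 7)
--     win_freq, max_wins = scan(wins, 6)
--     return loss_freq, win_freq, max_losses, max_wins
-- ===== Notes on version B (the rewrite author's own statement) =====
-- stated objective: simpler
-- what changed: Replaces itertools.groupby plus intermediate streak lists and two separate bucket loops by a single explicit run-length loop per list (shared by a scan helper) that maintains the current run counter, the running max and the bucket dict in one pass.
import Mathlib
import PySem

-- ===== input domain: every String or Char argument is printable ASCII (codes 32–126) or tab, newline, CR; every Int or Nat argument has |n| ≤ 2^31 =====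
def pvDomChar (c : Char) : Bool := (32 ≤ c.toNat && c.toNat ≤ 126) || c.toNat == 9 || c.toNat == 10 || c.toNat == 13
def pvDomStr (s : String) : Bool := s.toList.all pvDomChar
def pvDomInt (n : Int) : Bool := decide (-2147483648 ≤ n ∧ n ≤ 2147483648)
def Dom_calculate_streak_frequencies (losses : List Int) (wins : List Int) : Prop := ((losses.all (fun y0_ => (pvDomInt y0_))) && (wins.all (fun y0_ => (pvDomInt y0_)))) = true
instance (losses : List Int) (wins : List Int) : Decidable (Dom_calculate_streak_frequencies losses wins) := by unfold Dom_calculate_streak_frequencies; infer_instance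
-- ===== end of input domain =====

-- B replaces itertools.groupby + intermediate streak lists + separate bucket loops by one
-- explicit run-length loop per list (a shared scan helper); same return value, dicts in the
-- same insertion order.

-- ===== PORT A =====
-- hand port of itertools.groupby specialised to a list whose groups are consumed eagerly:
-- returns the (key, group length) pairs in order (exact for lists).
def pyGroupby (xs : List Int) : List (Int × Int) :=
  match xs with
  | [] => []
  | x :: t =>
      (x, ((t.takeWhile (· == x)).length : Int) + 1) :: pyGroupby (t.dropWhile (· == x))
termination_by xs.length
decreasing_by
  simp only [List.length_cons]
  have := List.length_dropWhile_le (· == x) t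
  omega

def calculate_streak_frequencies (losses : List Int) (wins : List Int) : (List (Int × Int)) × (List (Int × Int)) × Int × Int :=
  let loss_streaks := (pyGroupby losses).filterMap (fun p => if p.1 = 1 then some p.2 else none)
  let win_streaks := (pyGroupby wins).filterMap (fun p => if p.1 = 1 then some p.2 else none)
  let max_losses := (PySem.List.max? loss_streaks (fun y => y)).getD 0
  let max_wins := (PySem.List.max? win_streaks (fun y => y)).getD 0
  let loss_freq : PySem.Dict Int Int := PySem.Dict.ofList [(3, 0), (4, 0), (5, 0), (6, 0), (7, 0)]
  let win_freq : PySem.Dict Int Int := PySem.Dict.ofList [(3, 0), (4, 0), (5, 0), (6, 0)]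
  -- 'loss_freq[streak] += 1' runs only when the key is present, so modify with default 0 is exact
  let loss_freq := loss_streaks.foldl
    (fun d s => if d.contains s then d.modify s 0 (· + 1) else if s > 7 then d.modify 7 0 (· + 1) else d) loss_freq
  let win_freq := win_streaks.foldl
    (fun d s => if d.contains s then d.modify s 0 (· + 1) else if s > 6 then d.modify 6 0 (· + 1) else d) win_freq
  (loss_freq.items, win_freq.items, max_losses, max_wins)

-- ===== PORT B =====
-- the body of B's for-loop: state (freq, best, run)
def altStep (cap : Int) (st : PySem.Dict Int Int × Int × Int) (x : Int) : PySem.Dict Int Int × Int × Int :=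
  if x = 1 then (st.1, st.2.1, st.2.2 + 1)
  else
    let run := st.2.2
    let best := if run > st.2.1 then run else st.2.1
    let freq := if 3 ≤ run ∧ run ≤ cap then st.1.modify run 0 (· + 1)
                else if run > cap then st.1.modify cap 0 (· + 1) else st.1
    (freq, best, 0)

def altScan (xs : List Int) (cap : Int) : (List (Int × Int)) × Int :=
  let freq : PySem.Dict Int Int := (PySem.List.pyRange 3 (cap + 1) 1).foldl (fun d k => d.insert k 0) PySem.Dict.empty
  let st := (xs ++ [(0 : Int)]).foldl (altStep cap) (freq, 0, 0)
  (st.1.items, st.2.1)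

def calculate_streak_frequencies_alt (losses : List Int) (wins : List Int) : (List (Int × Int)) × (List (Int × Int)) × Int × Int :=
  let lf := altScan losses 7
  let wf := altScan wins 6
  (lf.1, wf.1, lf.2, wf.2)

-- ===== PRECONDITION & SPEC =====
def Spec_calculate_streak_frequencies (losses : List Int) (wins : List Int) (out : (List (Int × Int)) × (List (Int × Int)) × Int × Int) : Prop := out = calculate_streak_frequencies_alt losses wins
instance (losses : List Int) (wins : List Int) (out : (List (Int × Int)) × (List (Int × Int)) × Int × Int) : Decidable (Spec_calculate_streak_frequencies losses wins out) := by unfold Spec_calculate_streak_frequencies; infer_instance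

-- ===== CLAIM (what is proved, stated in full; the proofs are below) =====
def Claim_equal_calculate_streak_frequencies : Prop := ∀ (losses : List Int) (wins : List Int), Dom_calculate_streak_frequencies losses wins → Spec_calculate_streak_frequencies losses wins (calculate_streak_frequencies losses wins)

-- ===== LEMMAS AND PROOFS =====

-- the list of lengths of the maximal runs of 1 in xs, with a pending run of length r
def streaks : List Int → Int → List Int
  | [], r => if r = 0 then [] else [r]
  | x :: t, r => if x = 1 then streaks t (r + 1) else if r = 0 then streaks t 0 else r :: streaks t 0

-- B's run-closing actions on the two independent state components
def closeF (cap : Int) (d : PySem.Dict Int Int) (n : Int) : PySem.Dict Int Int :=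
  if 3 ≤ n ∧ n ≤ cap then d.modify n 0 (· + 1) else if n > cap then d.modify cap 0 (· + 1) else d

def closeB (b n : Int) : Int := if n > b then n else b

lemma closeF_zero (cap : Int) (hcap : 0 ≤ cap) (d : PySem.Dict Int Int) : closeF cap d 0 = d := by
  simp [closeF]; omega

lemma closeB_zero (b : Int) (hb : 0 ≤ b) : closeB b 0 = b := by
  simp [closeB]; omega

lemma altStep_eq (cap : Int) (d : PySem.Dict Int Int) (b r x : Int) :
    altStep cap (d, b, r) x = if x = 1 then (d, b, r + 1) else (closeF cap d r, closeB b r, 0) := by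
  simp only [altStep, closeF, closeB]

lemma streaks_pos : ∀ (t : List Int) (r : Int), 0 ≤ r → ∀ n ∈ streaks t r, 1 ≤ n := by
  intro t
  induction t with
  | nil =>
    intro r hr n hn
    simp only [streaks] at hn
    split at hn <;> simp at hn
    omega
  | cons x t ih =>
    intro r hr n hn
    simp only [streaks] at hn
    split at hn
    · exact ih (r + 1) (by omega) n hn
    · split at hn
      · exact ih 0 le_rfl n hn
      · rcases List.mem_cons.mp hn with h | h
        · omega
        · exact ih 0 le_rfl n h

lemma streaks_pos_arg : ∀ (t : List Int) (r : Int), 0 < r →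
    streaks t r = (((t.takeWhile (· == (1:Int))).length : Int) + r) :: streaks (t.dropWhile (· == (1:Int))) 0 := by
  intro t
  induction t with
  | nil =>
    intro r hr
    simp [streaks, hr.ne']
  | cons x t ih =>
    intro r hr
    by_cases hx : x = (1:Int)
    · subst hx
      simp only [streaks, List.takeWhile_cons, List.dropWhile_cons, beq_self_eq_true, if_pos]
      rw [ih (r + 1) (by omega)]
      simp only [List.length_cons]
      congr 1
      push_cast
      ring
    · have hb : ((x == (1:Int)) = false) := by simp [hx]
      simp only [streaks, if_neg hx, if_neg hr.ne', List.takeWhile_cons, List.dropWhile_cons, hb]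
      simp [streaks, hx]

lemma streaks_skip : ∀ (p s : List Int), (∀ a ∈ p, a ≠ 1) → streaks (p ++ s) 0 = streaks s 0 := by
  intro p s
  induction p with
  | nil => intro _; rfl
  | cons a p ih =>
    intro h
    have ha : a ≠ 1 := h a (by simp)
    simp only [List.cons_append, streaks, if_neg ha]
    exact ih (fun b hb => h b (by simp [hb]))

lemma groupby_filter_aux : ∀ (n : Nat) (xs : List Int), xs.length ≤ n →
    (pyGroupby xs).filterMap (fun p => if p.1 = 1 then some p.2 else none) = streaks xs 0 := by
  intro n
  induction n with
  | zero =>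
    intro xs h
    have : xs = [] := List.eq_nil_of_length_eq_zero (by omega)
    subst this; simp [pyGroupby, streaks]
  | succ n ih =>
    intro xs h
    match xs with
    | [] => simp [pyGroupby, streaks]
    | x :: t =>
      rw [pyGroupby]
      by_cases hx : x = (1:Int)
      · subst hx
        have hlen : (t.dropWhile (· == (1:Int))).length ≤ n := by
          have := List.length_dropWhile_le (· == (1:Int)) t
          simp only [List.length_cons] at h; omega
        simp only [List.filterMap_cons, streaks, ite_true]
        rw [ih _ hlen]
        norm_num
        rw [streaks_pos_arg t 1 (by norm_num)]
      · simp only [List.filterMap_cons, if_neg hx]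
        have hlen : (t.dropWhile (· == x)).length ≤ n := by
          have := List.length_dropWhile_le (· == x) t
          simp only [List.length_cons] at h; omega
        rw [ih _ hlen]
        show _ = streaks (x :: t) 0
        simp only [streaks, if_neg hx, ite_true]
        conv_rhs => rw [← List.takeWhile_append_dropWhile (p := (· == x)) (l := t)]
        rw [streaks_skip]
        intro a ha
        have := List.mem_takeWhile_imp ha
        simp only [beq_iff_eq] at this
        subst this
        exact hx

lemma groupby_filter_eq_streaks : ∀ (xs : List Int),
    (pyGroupby xs).filterMap (fun p => if p.1 = 1 then some p.2 else none) = streaks xs 0 :=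
  fun xs => groupby_filter_aux xs.length xs le_rfl

lemma foldB_eq (cap : Int) (hcap : 0 ≤ cap) : ∀ (xs : List Int) (d : PySem.Dict Int Int) (b r : Int), 0 ≤ b → 0 ≤ r →
    (xs ++ [(0 : Int)]).foldl (altStep cap) (d, b, r)
      = ((streaks xs r).foldl (closeF cap) d, (streaks xs r).foldl closeB b, 0) := by
  intro xs
  induction xs with
  | nil =>
    intro d b r hb hr
    simp only [List.nil_append, List.foldl_cons, List.foldl_nil]
    rw [altStep_eq, if_neg (by norm_num : ¬ (0:Int) = 1)]
    by_cases hr0 : r = 0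
    · subst hr0
      rw [closeF_zero cap hcap, closeB_zero b hb]
      simp [streaks]
    · simp [streaks, hr0]
  | cons x t ih =>
    intro d b r hb hr
    by_cases hx : x = 1
    · subst hx
      simp only [List.cons_append, List.foldl_cons]
      rw [altStep_eq, if_pos rfl]
      rw [ih d b (r + 1) hb (by omega)]
      simp [streaks]
    · simp only [List.cons_append, List.foldl_cons]
      rw [show altStep cap (d, b, r) x = (closeF cap d r, closeB b r, 0) by
        simp [altStep, hx, closeF, closeB]]
      have hb' : 0 ≤ closeB b r := by simp [closeB]; omega
      rw [ih (closeF cap d r) (closeB b r) 0 hb' le_rfl]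
      by_cases hr0 : r = 0
      · subst hr0
        rw [closeF_zero cap hcap, closeB_zero b hb]
        simp [streaks, hx]
      · simp [streaks, hx, hr0]

lemma foldA_eq (cap : Int) (hcap : 3 ≤ cap) : ∀ (l : List Int) (d : PySem.Dict Int Int),
    (∀ u, d.contains u = decide (3 ≤ u ∧ u ≤ cap)) →
    l.foldl (fun d s => if d.contains s then d.modify s 0 (· + 1) else if s > cap then d.modify cap 0 (· + 1) else d) d
      = l.foldl (closeF cap) d := by
  intro l
  induction l with
  | nil => intro d _; rfl
  | cons s t ih =>
    intro d hd
    simp only [List.foldl_cons]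
    have hstep : (if d.contains s then d.modify s 0 (· + 1) else if s > cap then d.modify cap 0 (· + 1) else d)
        = closeF cap d s := by
      rw [hd s]
      by_cases hin : 3 ≤ s ∧ s ≤ cap
      · simp [closeF, hin]
      · simp only [decide_eq_true_eq, if_neg hin]
        simp [closeF, hin]
    rw [hstep]
    apply ih
    intro u
    by_cases hin : 3 ≤ s ∧ s ≤ cap
    · simp only [closeF, if_pos hin]
      rw [PySem.Dict.contains_modify]
      by_cases hu : u = s
      · subst hu; simp [hd, hin]
      · simp [hu, hd]
    · by_cases hgt : s > cap
      · simp only [closeF, if_neg hin, if_pos hgt]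
        rw [PySem.Dict.contains_modify]
        by_cases hu : u = cap
        · subst hu; simp [hd]; omega
        · simp [hu, hd]
      · simp [closeF, hin, hgt, hd]

lemma max_eq_fold : ∀ (l : List Int), (∀ n ∈ l, 1 ≤ n) →
    (PySem.List.max? l (fun y => y)).getD 0 = l.foldl closeB 0 := by
  intro l hl
  have hcb : closeB = fun (b n : Int) => max b n := by
    funext b n
    simp only [closeB, max_def]
    split_ifs <;> omega
  cases l with
  | nil => simp [PySem.List.max?]
  | cons x t =>
    rw [PySem.List.max?_id_cons]
    simp only [Option.getD_some, hcb, List.foldl_cons]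
    have h1 : max 0 x = x := by
      have := hl x (by simp)
      omega
    rw [h1]

lemma init7_contains : ∀ u : Int, (PySem.Dict.ofList [((3:Int),(0:Int)),(4,0),(5,0),(6,0),(7,0)]).contains u = decide (3 ≤ u ∧ u ≤ 7) := by
  intro u
  rw [Bool.eq_iff_iff]
  simp [PySem.Dict.ofList, PySem.Dict.update, PySem.Dict.contains, PySem.Dict.insert, PySem.Dict.empty]
  omega

lemma init6_contains : ∀ u : Int, (PySem.Dict.ofList [((3:Int),(0:Int)),(4,0),(5,0),(6,0)]).contains u = decide (3 ≤ u ∧ u ≤ 6) := by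
  intro u
  rw [Bool.eq_iff_iff]
  simp [PySem.Dict.ofList, PySem.Dict.update, PySem.Dict.contains, PySem.Dict.insert, PySem.Dict.empty]
  omega

-- ===== VERDICT (by name: the statement is the Claim_ definition above) =====
theorem calculate_streak_frequencies_spec : Claim_equal_calculate_streak_frequencies := by
  intro losses wins _
  unfold Spec_calculate_streak_frequencies
  simp only [calculate_streak_frequencies, calculate_streak_frequencies_alt, altScan]
  rw [groupby_filter_eq_streaks losses, groupby_filter_eq_streaks wins]
  rw [foldA_eq 7 (by norm_num) _ _ init7_contains, foldA_eq 6 (by norm_num) _ _ init6_contains]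
  rw [max_eq_fold _ (streaks_pos losses 0 le_rfl), max_eq_fold _ (streaks_pos wins 0 le_rfl)]
  have h7 : (PySem.List.pyRange 3 (7 + 1) 1).foldl (fun (d : PySem.Dict Int Int) k => d.insert k 0) PySem.Dict.empty
      = PySem.Dict.ofList [(3, 0), (4, 0), (5, 0), (6, 0), (7, 0)] := by decide
  have h6 : (PySem.List.pyRange 3 (6 + 1) 1).foldl (fun (d : PySem.Dict Int Int) k => d.insert k 0) PySem.Dict.empty
      = PySem.Dict.ofList [(3, 0), (4, 0), (5, 0), (6, 0)] := by decide
  rw [h7, h6]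
  rw [foldB_eq 7 (by norm_num) losses _ 0 0 le_rfl le_rfl, foldB_eq 6 (by norm_num) wins _ 0 0 le_rfl le_rfl]
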